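-- pv_equiv track=rewrite | github.com/mahdaviansam/secureGuardian | secureGuardian.py | find_ip_ranges
-- ===== SOURCE A (Python) =====
-- def find_ip_ranges(data, prefix_length):
--     ranges = {}
--     for ip in data:
--         prefix = ".".join(ip.split(".")[:prefix_length])
--         if prefix not in ranges:
--             ranges[prefix] = []
--         ranges[prefix].append(ip)
--     return ranges
-- ===== SOURCE B (Python) =====
-- def find_ip_ranges(data, prefix_length):
--     def key(ip):
--         return ".".join(ip.split(".")[:prefix_length])
--     result = {}
--     pending = data
--     while pending:
--         k = key(pending[0])
--         result[k] = [ip for ip in pending if key(ip) == k]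
--         pending = [ip for ip in pending if key(ip) != k]
--     return result
-- ===== Notes on version B (the rewrite author's own statement) =====
-- stated objective: alternative
-- what changed: Replaces A's dict-of-buckets single pass (membership test, create, append per element) by partition refinement: a loop that repeatedly takes the first remaining ip's prefix, extracts that whole bucket by filtering, and recurses on the leftover list, so no per-element dict operations remain.
import Mathlib
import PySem

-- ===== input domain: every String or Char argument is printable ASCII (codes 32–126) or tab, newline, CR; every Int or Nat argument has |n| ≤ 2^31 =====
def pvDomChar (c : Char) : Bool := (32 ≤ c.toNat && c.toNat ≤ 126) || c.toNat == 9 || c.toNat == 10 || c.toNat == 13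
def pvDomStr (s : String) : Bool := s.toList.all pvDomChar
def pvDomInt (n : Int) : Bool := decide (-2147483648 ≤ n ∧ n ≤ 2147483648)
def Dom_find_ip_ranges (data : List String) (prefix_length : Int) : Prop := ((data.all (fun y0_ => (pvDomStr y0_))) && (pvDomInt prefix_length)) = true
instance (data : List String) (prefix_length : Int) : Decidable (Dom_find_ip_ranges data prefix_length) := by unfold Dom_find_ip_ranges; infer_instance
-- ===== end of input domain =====

-- B replaces A's dict-of-buckets single pass by partition refinement (peel off one whole bucket per round by filtering); same result, no speed claim.

-- ===== PORT A =====
-- prefix = ".".join(ip.split(".")[:prefix_length])  (the identical expression occurs in both Pythons)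
-- split? returns none only for sep = ""; the separator here is the literal ".", so .getD [] never fires
def pvPrefixKey (prefix_length : Int) (ip : String) : String :=
  PySem.Str.join "." (PySem.List.slice ((PySem.Str.split? ip ".").getD []) none (some prefix_length))

def find_ip_ranges (data : List String) (prefix_length : Int) : List (String × List String) :=
  (data.foldl (fun (ranges : PySem.Dict String (List String)) ip =>
      let pfx := pvPrefixKey prefix_length ip
      let ranges := if ranges.contains pfx = false then ranges.insert pfx [] else ranges
      ranges.modify pfx [] (fun l => l ++ [ip]))
    PySem.Dict.empty).items

-- ===== PORT B =====
-- the while loop of Source B: result accumulates one whole bucket per round, pending shrinks to the leftover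
def pvAltGo (key : String → String) (result : PySem.Dict String (List String)) :
    List String → PySem.Dict String (List String)
  | [] => result
  | ip :: rest =>
      let k := key ip
      pvAltGo key (result.insert k ((ip :: rest).filter (fun x => key x == k)))
        ((ip :: rest).filter (fun x => !(key x == k)))
  termination_by pending => pending.length
  decreasing_by
    simp only [List.filter, beq_self_eq_true, Bool.not_true]
    exact Nat.lt_succ_of_le (List.length_filter_le _ _)

def find_ip_ranges_alt (data : List String) (prefix_length : Int) : List (String × List String) :=
  (pvAltGo (pvPrefixKey prefix_length) PySem.Dict.empty data).items

-- ===== PRECONDITION & SPEC =====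
def Spec_find_ip_ranges (data : List String) (prefix_length : Int) (out : List (String × List String)) : Prop := out = find_ip_ranges_alt data prefix_length
instance (data : List String) (prefix_length : Int) (out : List (String × List String)) : Decidable (Spec_find_ip_ranges data prefix_length out) := by unfold Spec_find_ip_ranges; infer_instance

-- ===== CLAIM (what is proved, stated in full; the proofs are below) =====
def Claim_equal_find_ip_ranges : Prop := ∀ (data : List String) (prefix_length : Int), Dom_find_ip_ranges data prefix_length → Spec_find_ip_ranges data prefix_length (find_ip_ranges data prefix_length)

-- ===== LEMMAS AND PROOFS =====

-- A's loop body ("if absent, insert []; then append") is one Dict.modify step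
lemma pvStep_eq_modify (d : PySem.Dict String (List String)) (k : String) (ip : String) :
    (if d.contains k = false then d.insert k [] else d).modify k [] (fun l => l ++ [ip])
      = d.modify k [] (fun l => l ++ [ip]) := by
  by_cases h : d.contains k = false
  · simp only [h, if_true]
    have ha : (d.items.any fun p => p.1 == k) = false := h
    have h' : ∀ p ∈ d.items, p.1 ≠ k := by
      simpa [List.any_eq_false] using ha
    have hf : List.find? (fun p => p.1 == k) d.items = none :=
      List.find?_eq_none.mpr (by intro p hp; simpa using h' p hp)
    apply PySem.Dict.ext
    simp [PySem.Dict.modify, PySem.Dict.insert, PySem.Dict.contains, PySem.Dict.getD,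
      PySem.Dict.get?, hf, ha]
    have hm : List.map (fun p => if p.1 = k then (k, [ip]) else p) d.items
        = List.map id d.items := List.map_congr_left (fun p hp => by simp [h' p hp])
    simpa using hm
  · simp [h]

-- first-occurrence dedup commutes with filter
lemma pvOfList_filter (p : String → Bool) (xs : List String) :
    PySem.Set.ofList (xs.filter p) = (PySem.Set.ofList xs).filter p := by
  induction xs with
  | nil => simp [PySem.Set.ofList_nil]
  | cons x xs ih =>
    by_cases hx : p x = true
    · simp only [List.filter_cons, hx, if_true, PySem.Set.ofList_cons, ih,
        PySem.Set.discard, List.filter_filter]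
      exact congrArg _ (List.filter_congr (fun a _ => by rw [Bool.and_comm]))
    · have hx' : p x = false := by simpa using hx
      simp only [List.filter_cons, hx', Bool.false_eq_true, if_false, ih,
        PySem.Set.ofList_cons, PySem.Set.discard, List.filter_filter]
      apply List.filter_congr
      intro a _
      by_cases h : a = x <;> simp [h, hx']

-- map-filter exchange used on B's leftover list
lemma pvMapFilterKey (key : String → String) (k : String) (l : List String) :
    (l.filter (fun x => !(key x == k))).map key = (l.map key).filter (fun y => !(y == k)) := by
  induction l with
  | nil => rfl
  | cons a l ihl =>
    by_cases h : (key a == k) = true <;> simp [h, ihl]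

-- the canonical value both programs compute
def pvCanon (key : String → String) (data : List String) : List (String × List String) :=
  (PySem.Set.ofList (data.map key)).map (fun c => (c, data.filter (fun x => key x == c)))

-- B's loop produces result.items ++ canonical form of pending, as long as pending's keys are fresh
lemma pvAltGo_items (key : String → String) (result : PySem.Dict String (List String))
    (pending : List String)
    (hfresh : ∀ x ∈ pending, result.contains (key x) = false) :
    (pvAltGo key result pending).items = result.items ++ pvCanon key pending := by
  match pending with
  | [] => simp [pvAltGo, pvCanon, PySem.Set.ofList_nil]
  | ip :: rest =>
    rw [pvAltGo]
    set k := key ip with hk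
    have hkself : (key ip == k) = true := by simp [hk]
    have hrest : (ip :: rest).filter (fun x => !(key x == k)) = rest.filter (fun x => !(key x == k)) := by
      rw [List.filter_cons_of_neg (by simp [hkself])]
    have hfresh' : ∀ x ∈ (ip :: rest).filter (fun x => !(key x == k)),
        (result.insert k ((ip :: rest).filter (fun x => key x == k))).contains (key x) = false := by
      intro x hx
      rw [List.mem_filter] at hx
      rw [PySem.Dict.contains_insert]
      simp only [Bool.or_eq_false_iff]
      exact ⟨by simpa using hx.2, hfresh x hx.1⟩
    rw [pvAltGo_items key _ _ hfresh']
    rw [PySem.Dict.items_insert_of_not_contains _ _ (hfresh ip (by simp))]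
    rw [List.append_assoc]
    congr 1
    -- canonical form of pending splits as head bucket :: canonical form of leftover
    show ((k, (ip :: rest).filter (fun x => key x == k))
        :: pvCanon key ((ip :: rest).filter (fun x => !(key x == k))))
      = pvCanon key (ip :: rest)
    unfold pvCanon
    rw [hrest, pvMapFilterKey key k rest, pvOfList_filter,
      List.map_cons, PySem.Set.ofList_cons, List.map_cons]
    congr 1
    unfold PySem.Set.discard
    apply List.map_congr_left
    intro c hc
    rw [List.mem_filter] at hc
    have hck' : c ≠ k := by simpa using hc.2
    congr 1
    rw [List.filter_filter,
      List.filter_cons_of_neg (by simp; intro h; exact hck' h.symm)]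
    apply List.filter_congr
    intro y _
    by_cases h : key y = c
    · simp [h, hck']
    · simp [h]
  termination_by pending.length
  decreasing_by
    simp only [List.filter, beq_self_eq_true, Bool.not_true]
    exact Nat.lt_succ_of_le (List.length_filter_le _ _)

theorem find_ip_ranges_spec : Claim_equal_find_ip_ranges := by
  intro data prefix_length _
  unfold Spec_find_ip_ranges find_ip_ranges find_ip_ranges_alt
  set key := pvPrefixKey prefix_length with hkey
  -- A's loop is a pure modify-fold
  have hstep : (data.foldl (fun (ranges : PySem.Dict String (List String)) ip =>
      let pfx := key ip
      let ranges := if ranges.contains pfx = false then ranges.insert pfx [] else ranges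
      ranges.modify pfx [] (fun l => l ++ [ip])) PySem.Dict.empty)
      = data.foldl (fun d ip => d.modify (key ip) [] (fun l => l ++ [ip])) PySem.Dict.empty := by
    exact PySem.List.foldl_congr_mem data _ _ _
      (fun d ip _ => pvStep_eq_modify d (key ip) ip)
  rw [hstep]
  set D := data.foldl (fun d ip => d.modify (key ip) [] (fun l => l ++ [ip])) PySem.Dict.empty with hD
  have hnd : D.keys.Nodup := by
    apply PySem.Dict.nodup_keys_foldl_modify_key data key [] (fun _ ip l => l ++ [ip])
    simp [PySem.Dict.keys_empty]
  have hkeys : D.keys = PySem.Set.ofList (data.map key) := by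
    rw [hD, PySem.Dict.keys_foldl_modify_key]
    simp [PySem.Dict.keys_empty, PySem.Set.update_eq_append_filter, PySem.Set.contains]
  have hget : ∀ c, D.getD c [] = data.filter (fun ip => key ip == c) := by
    intro c
    have hmap : D = (data.map (fun ip => (key ip, ip))).foldl
        (fun d p => d.modify p.1 [] (fun l => l ++ [p.2])) PySem.Dict.empty := by
      rw [hD, List.foldl_map]
    rw [hmap, PySem.Dict.getD_foldl_modify_append]
    simp [PySem.Dict.getD_empty, List.filter_map, Function.comp_def]
  -- A's items are the canonical bucket list
  have hA : D.items = pvCanon key data := by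
    rw [PySem.Dict.items_eq_map_keys D hnd [], hkeys]
    unfold pvCanon
    exact List.map_congr_left (fun c _ => by rw [hget c])
  -- B's loop from the empty dict produces exactly the canonical bucket list
  have hB : (pvAltGo key PySem.Dict.empty data).items = pvCanon key data := by
    rw [pvAltGo_items key PySem.Dict.empty data
      (fun x _ => PySem.Dict.contains_empty (key x))]
    simp [PySem.Dict.empty]
  rw [hA, hB]
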